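-- pv_equiv track=rewrite | github.com/MaurizioMartin/codewars | Katas/41-num_strings.py | numericals
-- ===== SOURCE A (Python) =====
-- def numericals(s):
--     string = ""
--     dictio = {}
--     for e in s:
--         if e in dictio:
--             dictio[e] = dictio[e]+1
--             string += str(dictio[e])
--         else:
--             dictio[e] = 1
--             string += str(dictio[e])
--     return string
-- ===== SOURCE B (Python) =====
-- def numericals(s):
--     return "".join(str(s.count(c, 0, i + 1)) for i, c in enumerate(s))
-- ===== Notes on version B (the rewrite author's own statement) =====
-- stated objective: simpler
-- what changed: Replaced the single pass that maintains a running-count dict with a stateless nested scan: for each index i, B recounts how often s[i] occurs in the prefix s[:i+1] and joins the counts.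
import Mathlib
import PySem

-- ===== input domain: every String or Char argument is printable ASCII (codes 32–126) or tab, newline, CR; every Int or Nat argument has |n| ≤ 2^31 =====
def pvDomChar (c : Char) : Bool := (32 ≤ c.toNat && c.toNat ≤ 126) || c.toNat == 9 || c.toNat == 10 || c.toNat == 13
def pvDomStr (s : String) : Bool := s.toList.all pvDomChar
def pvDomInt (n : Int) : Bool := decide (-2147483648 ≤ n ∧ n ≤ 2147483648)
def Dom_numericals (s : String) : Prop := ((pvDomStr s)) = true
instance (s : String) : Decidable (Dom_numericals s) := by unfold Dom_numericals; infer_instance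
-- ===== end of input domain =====

-- B replaces A's single pass with a running-count dict by a stateless nested scan that
-- recounts each character over the prefix s[:i+1] (objective: simpler — no maintained state).

-- ===== PORT A =====
-- the for-loop of A: state is the output string and the dict 'dictio'
def numericalsLoop : List Char → String → PySem.Dict Char Int → String
  | [], acc, _ => acc
  | e :: rest, acc, d =>
    if d.contains e then
      -- dictio[e] = dictio[e]+1; string += str(dictio[e])   (key present, so getD _ 0 = dictio[e])
      numericalsLoop rest (acc ++ PySem.Int.toStr (d.getD e 0 + 1)) (d.insert e (d.getD e 0 + 1))
    else
      -- dictio[e] = 1; string += str(dictio[e])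
      numericalsLoop rest (acc ++ PySem.Int.toStr 1) (d.insert e 1)

def numericals (s : String) : String :=
  numericalsLoop s.toList "" PySem.Dict.empty

-- ===== PORT B =====
-- "".join(str(s.count(c, 0, i + 1)) for i, c in enumerate(s)); PySem has no bounded str.count,
-- so the bounded count s.count(c, 0, i+1) is ported by hand as counting c in the slice s[0:i+1]
-- (exact: same characters examined, c a single char)
def numericals_alt (s : String) : String :=
  PySem.Str.join "" ((PySem.List.enumerate s.toList).map
    (fun ic => PySem.Int.toStr ((PySem.List.slice s.toList none (some (ic.1 + 1))).count ic.2 : Nat)))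

-- ===== PRECONDITION & SPEC =====
def Spec_numericals (s : String) (out : String) : Prop := out = numericals_alt s
instance (s : String) (out : String) : Decidable (Spec_numericals s out) := by unfold Spec_numericals; infer_instance

-- ===== CLAIM (what is proved, stated in full; the proofs are below) =====
def Claim_equal_numericals : Prop := ∀ (s : String), Dom_numericals s → Spec_numericals s (numericals s)

-- ===== LEMMAS AND PROOFS =====

-- common reference form: for each char of `rest`, the digits of (occurrences so far in pre) + 1
def pvRef (pre rest : List Char) : List Char :=
  match rest with
  | [] => []
  | c :: r => PySem.Int.toChars ((pre.count c : Int) + 1) ++ pvRef (pre ++ [c]) r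

-- joining with "" is concatenation
theorem pvJoin_nil_flatten (l : List (List Char)) :
    PySem.Chars.join [] l = l.flatten := by
  induction l with
  | nil => simp [PySem.Chars.join_nil]
  | cons p rest ih =>
    cases rest with
    | nil => simp [PySem.Chars.join_singleton]
    | cons q r =>
      rw [PySem.Chars.join_cons_cons]
      simp_all

theorem pvTake_append (pre : List Char) (c : Char) (r : List Char) :
    (pre ++ c :: r).take (pre.length + 1) = pre ++ [c] := by
  rw [List.take_append]
  simp

-- A-side: the loop run on `rest` with dict = running counter of `pre` appends pvRef pre rest
theorem pvA_loop (rest : List Char) : ∀ (pre : List Char) (acc : String),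
    (numericalsLoop rest acc
        (pre.foldl (fun d x => d.insert x (d.getD x 0 + 1)) PySem.Dict.empty)).toList
      = acc.toList ++ pvRef pre rest := by
  induction rest with
  | nil => intro pre acc; simp [numericalsLoop, pvRef]
  | cons c r ih =>
    intro pre acc
    have hctr : pre.foldl (fun d x => d.insert x (d.getD x 0 + 1)) PySem.Dict.empty
        = PySem.Dict.counter pre := PySem.Dict.foldl_insert_getD_add_one_eq_counter pre
    have hnext : (pre ++ [c]).foldl (fun d x => d.insert x (d.getD x 0 + 1)) PySem.Dict.empty
        = (PySem.Dict.counter pre).insert c ((PySem.Dict.counter pre).getD c 0 + 1) := by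
      rw [List.foldl_append, hctr]; simp
    rw [hctr]
    by_cases hc : c ∈ pre
    · rw [numericalsLoop]
      rw [if_pos (by simp [PySem.Dict.contains_counter, hc])]
      rw [← hnext, ih (pre ++ [c])]
      simp [pvRef, PySem.Dict.getD_counter, PySem.Int.toList_toStr]
    · rw [numericalsLoop]
      rw [if_neg (by simp [PySem.Dict.contains_counter, hc])]
      have h0 : (1 : Int) = (PySem.Dict.counter pre).getD c 0 + 1 := by
        rw [PySem.Dict.getD_counter]
        simp [List.count_eq_zero_of_not_mem hc]
      rw [h0, ← hnext, ih (pre ++ [c])]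
      simp [pvRef, PySem.Dict.getD_counter, PySem.Int.toList_toStr,
        List.count_eq_zero_of_not_mem hc]

-- B-side: the enumerated tail of the comprehension flattens to pvRef pre rest
theorem pvB_side (rest : List Char) : ∀ (pre : List Char),
    ((PySem.List.enumerate rest (pre.length : Int)).map
      (fun ic => PySem.Int.toChars
        ((PySem.List.slice (pre ++ rest) none (some (ic.1 + 1))).count ic.2 : Nat))).flatten
    = pvRef pre rest := by
  induction rest with
  | nil => intro pre; simp [PySem.List.enumerate_nil, pvRef]
  | cons c r ih =>
    intro pre
    rw [PySem.List.enumerate_cons, List.map_cons, List.flatten_cons, pvRef]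
    have h1 : ((pre.length : Int) + 1) = ((pre.length + 1 : Nat) : Int) := by push_cast; ring
    have hsl : PySem.List.slice (pre ++ c :: r) none (some ((pre.length : Int) + 1))
        = pre ++ [c] := by
      rw [h1, PySem.List.slice_to_natCast, pvTake_append]
    have harg : ∀ ic : Int × Char, ic ∈ PySem.List.enumerate r ((pre.length : Int) + 1) →
        PySem.Int.toChars ((PySem.List.slice (pre ++ c :: r) none (some (ic.1 + 1))).count ic.2 : Nat)
        = PySem.Int.toChars ((PySem.List.slice ((pre ++ [c]) ++ r) none (some (ic.1 + 1))).count ic.2 : Nat) := by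
      intro ic _; simp
    dsimp only
    rw [hsl, List.map_congr_left harg]
    have hlen : ((pre.length : Int) + 1) = (((pre ++ [c]).length : Nat) : Int) := by
      simp
    rw [hlen, ih (pre ++ [c])]
    have hcount : ((pre ++ [c]).count c : Int) = (pre.count c : Int) + 1 := by
      rw [List.count_append]; simp
    rw [hcount]

theorem pvAlt_toList (s : String) :
    (numericals_alt s).toList = pvRef [] s.toList := by
  unfold numericals_alt
  rw [PySem.Str.toList_join]
  have : ∀ l : List (Int × Char),
      List.map String.toList (l.map (fun ic => PySem.Int.toStr
        ((PySem.List.slice s.toList none (some (ic.1 + 1))).count ic.2 : Nat)))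
      = l.map (fun ic => PySem.Int.toChars
        ((PySem.List.slice s.toList none (some (ic.1 + 1))).count ic.2 : Nat)) := by
    intro l; rw [List.map_map]; apply List.map_congr_left; intro ic _
    simp [PySem.Int.toList_toStr]
  rw [this]
  have hemp : ("" : String).toList = [] := rfl
  rw [hemp, pvJoin_nil_flatten]
  have := pvB_side s.toList []
  simpa using this

-- ===== VERDICT (by name: the statement is the Claim_ definition above) =====
theorem numericals_spec : Claim_equal_numericals := by
  intro s _
  unfold Spec_numericals
  rw [← String.toList_inj]
  have hA : (numericals s).toList = pvRef [] s.toList := by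
    have := pvA_loop s.toList [] ""
    simpa [numericals] using this
  rw [hA, pvAlt_toList]
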